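-- pv_equiv track=rewrite | github.com/mve17/SPISE-2019 | Day 5/lecture_code_coin_toss.py | compute_longest_run
-- ===== SOURCE A (Python) =====
-- def compute_longest_run(coin_tosses):
-- 	# coin_tosses should be a string as output by flip_coins().
-- 	# Returns the length of the longest run
--
-- 	# The procedure is to scan through the string, counting each run length
-- 	longest_run_length = 1
-- 	current_index = 0
-- 	current_run_length = 1
-- 	while current_index <= len(coin_tosses) - 2:
-- 		# If next letter is the same, increment current run length
-- 		if coin_tosses[current_index + 1] == coin_tosses[current_index]:
-- 			current_run_length += 1
-- 			if current_run_length > longest_run_length: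
-- 				longest_run_length = current_run_length
-- 		else:
-- 			current_run_length = 1
-- 		current_index += 1
-- 	return longest_run_length
-- ===== SOURCE B (Python) =====
-- from itertools import groupby
--
-- def compute_longest_run(coin_tosses):
--     # Split into maximal runs of equal characters and take the longest.
--     return max((sum(1 for _ in g) for _, g in groupby(coin_tosses)), default=1)
-- ===== Notes on version B (the rewrite author's own statement) =====
-- stated objective: idiomatic
-- what changed: Replaces the index-based while loop with running longest/current counters by itertools.groupby: the string is split into maximal runs of equal characters and the maximum run length is taken (default=1 for the empty string).
import Mathlib
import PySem

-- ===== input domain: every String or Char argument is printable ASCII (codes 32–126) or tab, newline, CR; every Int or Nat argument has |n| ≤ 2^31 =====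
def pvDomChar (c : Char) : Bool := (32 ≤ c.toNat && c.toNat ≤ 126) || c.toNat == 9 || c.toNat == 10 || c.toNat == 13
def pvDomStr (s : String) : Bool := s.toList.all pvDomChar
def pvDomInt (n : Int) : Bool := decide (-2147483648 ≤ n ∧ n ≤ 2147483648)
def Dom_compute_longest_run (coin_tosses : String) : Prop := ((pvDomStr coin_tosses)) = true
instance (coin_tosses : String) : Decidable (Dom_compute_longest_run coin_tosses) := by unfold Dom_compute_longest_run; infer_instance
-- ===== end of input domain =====

-- B replaces A's index-walking longest/current counter loop by a groupby-style
-- split into maximal runs followed by a maximum (objective: idiomatic).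

-- ===== PORT A =====
-- A's while loop walks positions 0..n-2 comparing s[i+1] with s[i], keeping
-- (longest_run_length, current_run_length); ported as the structurally identical
-- walk carrying the previous character.
def pvLoopA (prev : Char) (rest : List Char) (longest cur : Int) : Int :=
  match rest with
  | [] => longest
  | c :: t =>
      if c == prev then
        let cur' := cur + 1
        let longest' := if cur' > longest then cur' else longest
        pvLoopA c t longest' cur'
      else
        pvLoopA c t longest 1

def compute_longest_run (coin_tosses : String) : Int :=
  match coin_tosses.toList with
  | [] => 1                       -- loop body never runs: len - 2 < 0
  | c :: rest => pvLoopA c rest 1 1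

-- ===== PORT B =====
-- groupby: split into maximal runs of equal characters, collect each run's length.
def pvRunLengths (c : Char) (k : Int) (rest : List Char) : List Int :=
  match rest with
  | [] => [k]
  | d :: t => if d == c then pvRunLengths c (k + 1) t else k :: pvRunLengths d 1 t

-- max(run lengths, default=1)
def compute_longest_run_alt (coin_tosses : String) : Int :=
  match coin_tosses.toList with
  | [] => 1
  | c :: rest => (pvRunLengths c 1 rest).foldl max 1

-- ===== PRECONDITION & SPEC =====
def Spec_compute_longest_run (coin_tosses : String) (out : Int) : Prop := out = compute_longest_run_alt coin_tosses
instance (coin_tosses : String) (out : Int) : Decidable (Spec_compute_longest_run coin_tosses out) := by unfold Spec_compute_longest_run; infer_instance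

-- ===== CLAIM (what is proved, stated in full; the proofs are below) =====
def Claim_equal_compute_longest_run : Prop := ∀ (coin_tosses : String), Dom_compute_longest_run coin_tosses → Spec_compute_longest_run coin_tosses (compute_longest_run coin_tosses)

-- ===== LEMMAS AND PROOFS =====

-- The first run length recorded by pvRunLengths is at least the seed k.
theorem pvRunLengths_head_ge (rest : List Char) (c : Char) (k : Int) :
    ∃ h l, pvRunLengths c k rest = h :: l ∧ k ≤ h := by
  induction rest generalizing c k with
  | nil => exact ⟨k, [], rfl, le_refl _⟩
  | cons d t ih =>
    by_cases hd : (d == c) = true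
    · obtain ⟨h, l, he, hk⟩ := ih c (k + 1)
      exact ⟨h, l, by simp [pvRunLengths, hd, he], by omega⟩
    · exact ⟨k, pvRunLengths d 1 t, by simp [pvRunLengths, hd], le_refl _⟩

-- Loop invariant: A's scanner equals folding max over the remaining run lengths,
-- provided cur ≤ longest.
theorem pvLoopA_eq (rest : List Char) (prev : Char) (longest cur : Int)
    (h1 : 1 ≤ cur) (hc : cur ≤ longest) :
    pvLoopA prev rest longest cur = (pvRunLengths prev cur rest).foldl max longest := by
  induction rest generalizing prev longest cur with
  | nil =>
    simp [pvLoopA, pvRunLengths, List.foldl]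
    omega
  | cons d t ih =>
    by_cases hd : (d == prev) = true
    · have hde : d = prev := eq_of_beq hd
      subst hde
      simp only [pvLoopA, pvRunLengths, hd, if_pos]
      obtain ⟨h, l, he, hk⟩ := pvRunLengths_head_ge t d (cur + 1)
      have hlong : (if cur + 1 > longest then cur + 1 else longest) = max longest (cur + 1) := by
        simp [max_def]; omega
      rw [ih d _ _ (by omega) (by rw [hlong]; exact le_max_right _ _), he, hlong]
      simp only [List.foldl]
      have : max (max longest (cur + 1)) h = max longest h := by
        rw [max_def, max_def, max_def]
        split_ifs <;> omega
      rw [this]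
    · simp only [pvLoopA, pvRunLengths, hd, if_neg, Bool.false_eq_true, not_false_iff]
      rw [ih d longest 1 (le_refl _) (by omega)]
      simp only [List.foldl]
      congr 1
      rw [max_def]
      split_ifs <;> omega

-- ===== VERDICT (by name: the statement is the Claim_ definition above) =====
theorem compute_longest_run_spec : Claim_equal_compute_longest_run := by
  intro s _
  unfold Spec_compute_longest_run compute_longest_run compute_longest_run_alt
  cases h : s.toList with
  | nil => rfl
  | cons c rest => exact pvLoopA_eq rest c 1 1 (le_refl _) (le_refl _)
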